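-- pv_equiv track=rewrite | github.com/wanaig/skillssss | fix_prompts.py | fix_tasks
-- ===== SOURCE A (Python) =====
-- def fix_tasks(content):
--     # Find all Task(...) blocks.
--     # The syntax could be:
--     # Task(
--     #   ...
--     #   prompt: "..."
--     # )
--
--     # We want to find Task(...) that is missing the closing `)`.
--     # A Task block starts with `Task(` and ends with `)` on a line by itself OR at the end of the prompt line.
--
--     # Let's use a simpler heuristic: look for `prompt: "[^"]*"`
--     # If it is followed by `\n``` ` or `\n\nskill` without a `)` in between, it is missing a `)`.
--
--     lines = content.split('\n')
--     in_task = False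
--     for i, line in enumerate(lines):
--         if 'Task(' in line:
--             in_task = True
--
--         if in_task and line.strip().startswith('prompt: "'):
--             # The prompt string might end on this line.
--             # Check if it ends with `"` or `")`
--             stripped = line.rstrip()
--             if stripped.endswith('"'):
--                 # Check next non-empty line
--                 next_line_idx = i + 1
--                 missing = True
--                 while next_line_idx < len(lines):
--                     nl = lines[next_line_idx].strip()
--                     if not nl:
--                         next_line_idx += 1
--                         continue
--                     if nl == ')' or nl == ')`' or nl.startswith(')'):
--                         missing = False
--                         break
--                     else:
--                         break
--
--                 if missing:
--                     lines[i] = stripped + ')'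
--             in_task = False
--
--     return '\n'.join(lines)
-- ===== SOURCE B (Python) =====
-- def fix_tasks(content):
--     lines = content.split('\n')
--     # Backward pass: pair each line with the first non-blank line after it.
--     nxt = [None] * len(lines)
--     follow = None
--     for i in range(len(lines) - 1, -1, -1):
--         nxt[i] = follow
--         if lines[i].strip():
--             follow = lines[i]
--     # Forward pass: local decision per line.
--     out = []
--     in_task = False
--     for line, follow in zip(lines, nxt):
--         if 'Task(' in line:
--             in_task = True
--         if in_task and line.strip().startswith('prompt: "'):
--             in_task = False
--             r = line.rstrip()
--             if r.endswith('"') and (follow is None or not follow.strip().startswith(')')):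
--                 out.append(r + ')')
--                 continue
--         out.append(line)
--     return '\n'.join(out)
-- ===== Notes on version B (the rewrite author's own statement) =====
-- stated objective: alternative
-- what changed: Replaces A's in-loop blank-skipping lookahead scan (while over later lines) by a backward pass that precomputes each line's next non-blank line, followed by one flat forward pass that decides each prompt line locally against that precomputed value.
import Mathlib
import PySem

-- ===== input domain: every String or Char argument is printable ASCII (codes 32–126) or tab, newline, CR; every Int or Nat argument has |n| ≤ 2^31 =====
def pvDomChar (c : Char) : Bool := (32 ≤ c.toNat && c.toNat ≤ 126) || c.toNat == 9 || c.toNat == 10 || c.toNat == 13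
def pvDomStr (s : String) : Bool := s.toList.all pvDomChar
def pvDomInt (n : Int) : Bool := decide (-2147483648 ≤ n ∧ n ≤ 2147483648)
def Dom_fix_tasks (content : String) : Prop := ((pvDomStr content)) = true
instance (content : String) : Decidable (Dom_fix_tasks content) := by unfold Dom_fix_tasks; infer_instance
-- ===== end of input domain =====

-- B replaces A's nested blank-skipping lookahead by a backward pass precomputing each
-- line's next non-blank line plus one flat forward pass (objective: alternative);
-- return values proved equal on all inputs.

-- ===== PORT A =====
-- A's inner `while` lookahead: true iff the closing `)` is missing after this prompt line
def pvLookMissing : List String → Bool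
  | [] => true
  | l :: rest =>
    let nl := PySem.Str.strip l
    if nl = "" then pvLookMissing rest
    else if nl = ")" ∨ nl = ")`" ∨ PySem.Str.startswith nl ")" = true then false
    else true

-- A's `for i, line in enumerate(lines)` loop; the mutation `lines[i] = stripped + ')'`
-- touches only the current line (the lookahead reads the still-unmodified lines after it),
-- so it is the emitted head of the structural recursion
def pvALoop (inTask : Bool) : List String → List String
  | [] => []
  | l :: rest =>
    let it1 := if PySem.Str.isIn "Task(" l then true else inTask
    if it1 && PySem.Str.startswith (PySem.Str.strip l) "prompt: \"" then
      let stripped := PySem.Str.rstrip l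
      if PySem.Str.endswith stripped "\"" then
        (if pvLookMissing rest then stripped ++ ")" else l) :: pvALoop false rest
      else
        l :: pvALoop false rest
    else
      l :: pvALoop it1 rest

def fix_tasks (content : String) : String :=
  -- sep "\n" ≠ "", so split? is never none
  PySem.Str.join "\n" (pvALoop false ((PySem.Str.split? content "\n").getD []))

-- ===== PORT B =====
-- Source B's backward `for i in range(len(lines)-1, -1, -1)` loop, run over the reversed list:
-- pairs each position with the `follow` value before its update
def pvBack : List String → Option String → List (Option String)
  | [], _ => []
  | l :: rest, follow =>
    follow :: pvBack rest (if PySem.Str.strip l ≠ "" then some l else follow)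

-- Source B's forward pass over `zip(lines, nxt)`
def pvBLoop (inTask : Bool) : List (String × Option String) → List String
  | [] => []
  | (l, follow) :: rest =>
    let it1 := if PySem.Str.isIn "Task(" l then true else inTask
    if it1 && PySem.Str.startswith (PySem.Str.strip l) "prompt: \"" then
      let r := PySem.Str.rstrip l
      if PySem.Str.endswith r "\"" &&
         (match follow with
          | none => true
          | some f => !(PySem.Str.startswith (PySem.Str.strip f) ")")) then
        (r ++ ")") :: pvBLoop false rest
      else
        l :: pvBLoop false rest
    else
      l :: pvBLoop it1 rest

-- joins Source B's two passes over the split lines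
def pvBRun (lines : List String) : String :=
  PySem.Str.join "\n" (pvBLoop false (lines.zip ((pvBack lines.reverse none).reverse)))

def fix_tasks_alt (content : String) : String :=
  -- sep "\n" ≠ "", so split? is never none
  pvBRun ((PySem.Str.split? content "\n").getD [])

-- ===== PRECONDITION & SPEC =====
def Spec_fix_tasks (content : String) (out : String) : Prop := out = fix_tasks_alt content
instance (content : String) (out : String) : Decidable (Spec_fix_tasks content out) := by unfold Spec_fix_tasks; infer_instance

-- ===== CLAIM (what is proved, stated in full; the proofs are below) =====
def Claim_equal_fix_tasks : Prop := ∀ (content : String), Dom_fix_tasks content → Spec_fix_tasks content (fix_tasks content)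

-- ===== LEMMAS AND PROOFS =====

-- spec function: the first non-blank line of the list, with fallback acc
def pvFirstNB : List String → Option String → Option String
  | [], acc => acc
  | l :: rest, acc => if PySem.Str.strip l ≠ "" then some l else pvFirstNB rest acc

-- the `follow` value after threading a whole list through pvBack's update step
def pvThread (ls : List String) (acc : Option String) : Option String :=
  ls.foldl (fun f l => if PySem.Str.strip l ≠ "" then some l else f) acc

-- what Source B's nxt array holds: position i ↦ first non-blank line strictly after i
def pvNxtSpec : List String → Option String → List (Option String)
  | [], _ => []
  | _ :: rest, acc => pvFirstNB rest acc :: pvNxtSpec rest acc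

lemma pvBack_concat (xs : List String) (y : String) (acc : Option String) :
    pvBack (xs ++ [y]) acc = pvBack xs acc ++ [pvThread xs acc] := by
  induction xs generalizing acc with
  | nil => simp [pvBack, pvThread]
  | cons x xs ih =>
    simp only [List.cons_append, pvBack, ih, pvThread, List.foldl_cons]

lemma pvThread_reverse (rest : List String) (acc : Option String) :
    pvThread rest.reverse acc = pvFirstNB rest acc := by
  induction rest generalizing acc with
  | nil => rfl
  | cons r rs ih =>
    simp only [List.reverse_cons, pvThread, List.foldl_append, List.foldl_cons, List.foldl_nil]
    simp only [pvThread] at ih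
    rw [ih]
    rfl

lemma pvBack_spec (ls : List String) (acc : Option String) :
    (pvBack ls.reverse acc).reverse = pvNxtSpec ls acc := by
  induction ls with
  | nil => rfl
  | cons l rest ih =>
    rw [List.reverse_cons, pvBack_concat, List.reverse_append, pvThread_reverse]
    simp [ih, pvNxtSpec]

lemma pvLookMissing_eq (rest : List String) :
    pvLookMissing rest =
      (match pvFirstNB rest none with
       | none => true
       | some f => !(PySem.Str.startswith (PySem.Str.strip f) ")")) := by
  induction rest with
  | nil => rfl
  | cons l rs ih =>
    simp only [pvLookMissing, pvFirstNB]
    by_cases hb : PySem.Str.strip l = ""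
    · simp [hb, ih]
    · rw [if_neg hb, if_pos hb]
      by_cases hs : PySem.Str.startswith (PySem.Str.strip l) ")" = true
      · rw [if_pos (Or.inr (Or.inr hs))]
        simp only [hs, Bool.not_true]
      · have h1 : PySem.Str.strip l ≠ ")" := by
          intro h; rw [h] at hs; exact hs (by decide)
        have h2 : PySem.Str.strip l ≠ ")`" := by
          intro h; rw [h] at hs; exact hs (by decide)
        rw [if_neg (by rintro (h | h | h); exacts [h1 h, h2 h, hs h])]
        simp only [Bool.not_eq_true] at hs
        simp only [hs, Bool.not_false]

lemma pvLoop_eq (ls : List String) (it : Bool) :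
    pvALoop it ls = pvBLoop it (ls.zip (pvNxtSpec ls none)) := by
  induction ls generalizing it with
  | nil => rfl
  | cons l rest ih =>
    simp only [pvNxtSpec, List.zip_cons_cons, pvALoop, pvBLoop]
    by_cases hC : ((if PySem.Str.isIn "Task(" l then true else it) &&
        PySem.Str.startswith (PySem.Str.strip l) "prompt: \"") = true
    · rw [if_pos hC, if_pos hC, ih, pvLookMissing_eq]
      by_cases hE : PySem.Str.endswith (PySem.Str.rstrip l) "\"" = true
      · rw [if_pos hE, hE, Bool.true_and]
        cases hF : pvFirstNB rest none with
        | none => rfl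
        | some f =>
          exact apply_ite (fun s => s :: pvBLoop false (rest.zip (pvNxtSpec rest none))) _ _ _
      · simp only [Bool.not_eq_true] at hE
        rw [hE, Bool.false_and]
        simp only [Bool.false_eq_true, if_false]
    · simp only [Bool.not_eq_true] at hC
      rw [hC]
      simp only [Bool.false_eq_true, if_false, ih]

-- ===== VERDICT (by name: the statement is the Claim_ definition above) =====
theorem fix_tasks_spec : Claim_equal_fix_tasks := by
  intro content _
  unfold Spec_fix_tasks fix_tasks fix_tasks_alt pvBRun
  rw [pvBack_spec, pvLoop_eq]
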